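-- pv_equiv track=rewrite | github.com/sonGokuKhk98/Relator | app.py | _prioritized_select_list
-- ===== SOURCE A (Python) =====
-- from typing import List, Dict, Optional, Any
--
-- def _prioritized_select_list(where_cols: List[str], select_cols: List[str], limit: int = 12) -> List[str]:
--     """Build a select list that always includes WHERE columns."""
--     if "*" in select_cols:
--         return select_cols
--
--     seen = set()
--     ordered: List[str] = []
--
--     for col in where_cols + select_cols:
--         if col in seen:
--             continue
--         ordered.append(col)
--         seen.add(col)
--
--     if limit and len(ordered) > limit:
--         # Keep all WHERE columns, then truncate the rest
--         where_set = {c for c in where_cols}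
--         must_keep = [c for c in ordered if c in where_set]
--         remaining = [c for c in ordered if c not in where_set]
--         ordered = must_keep + remaining[: max(0, limit - len(must_keep))]
--
--     return ordered
-- ===== SOURCE B (Python) =====
-- from typing import List
--
-- def _prioritized_select_list(where_cols: List[str], select_cols: List[str], limit: int = 12) -> List[str]:
--     """Build a select list that always includes WHERE columns."""
--     if "*" in select_cols:
--         return select_cols
--
--     # Ordered first-occurrence dedup in one library call; WHERE cols lead, so the
--     # unique WHERE cols are exactly the first len(set(where_cols)) entries and the
--     # whole truncation collapses to a single slice.
--     ordered = list(dict.fromkeys(where_cols + select_cols))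
--     if limit and len(ordered) > limit:
--         ordered = ordered[: max(len(set(where_cols)), limit)]
--     return ordered
-- ===== Notes on version B (the rewrite author's own statement) =====
-- stated objective: simpler
-- what changed: Replaces A's manual seen-set dedup loop plus the filter-based must_keep/remaining re-split with a single dict.fromkeys dedup and one closed-form slice ordered[:max(len(set(where_cols)), limit)], which is valid because the unique WHERE columns are exactly the leading prefix of the deduped list.
import Mathlib
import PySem

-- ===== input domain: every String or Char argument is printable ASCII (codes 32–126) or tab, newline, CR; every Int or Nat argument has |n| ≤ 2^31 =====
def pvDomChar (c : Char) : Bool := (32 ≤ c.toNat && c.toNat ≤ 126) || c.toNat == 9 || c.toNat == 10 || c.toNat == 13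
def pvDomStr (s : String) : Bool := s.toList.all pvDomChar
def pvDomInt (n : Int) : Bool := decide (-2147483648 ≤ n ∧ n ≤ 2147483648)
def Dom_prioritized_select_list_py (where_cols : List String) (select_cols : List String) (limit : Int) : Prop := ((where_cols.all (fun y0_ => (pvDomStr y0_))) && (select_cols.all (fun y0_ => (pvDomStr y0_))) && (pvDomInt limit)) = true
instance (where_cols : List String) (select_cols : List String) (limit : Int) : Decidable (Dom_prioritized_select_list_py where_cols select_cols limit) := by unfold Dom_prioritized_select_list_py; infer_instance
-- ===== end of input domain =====

-- B replaces A's manual seen-set dedup loop plus the filter-based must_keep/remaining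
-- re-split with one dict.fromkeys dedup and a single closed-form slice; objective: simpler.

-- ===== PORT A =====
-- the body of A's for-loop "if col in seen: continue; ordered.append(col); seen.add(col)"
def pvStepA (st : PySem.Set String × List String) (col : String) : PySem.Set String × List String :=
  if col ∈ st.1 then st else (st.1.add col, st.2 ++ [col])

def prioritized_select_list_py (where_cols : List String) (select_cols : List String) (limit : Int) : List String :=
  if "*" ∈ select_cols then select_cols
  else
    -- for col in where_cols + select_cols: dedup into `ordered` with the `seen` set
    let st := (where_cols ++ select_cols).foldl pvStepA (PySem.Set.empty, [])
    let ordered := st.2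
    if limit ≠ 0 ∧ limit < (ordered.length : Int) then
      let where_set : PySem.Set String := PySem.Set.ofList where_cols
      let must_keep := ordered.filter (fun c => decide (c ∈ where_set))
      let remaining := ordered.filter (fun c => decide (c ∉ where_set))
      must_keep ++ remaining.take (max 0 (limit - (must_keep.length : Int))).toNat
    else ordered

-- ===== PORT B =====
def prioritized_select_list_py_alt (where_cols : List String) (select_cols : List String) (limit : Int) : List String :=
  if "*" ∈ select_cols then select_cols
  else
    -- ordered = list(dict.fromkeys(where_cols + select_cols))
    let ordered := PySem.List.dedup (where_cols ++ select_cols)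
    if limit ≠ 0 ∧ limit < (ordered.length : Int) then
      -- ordered[: max(len(set(where_cols)), limit)]
      PySem.List.slice ordered none (some (max ((PySem.Set.ofList where_cols).length : Int) limit))
    else ordered

-- ===== PRECONDITION & SPEC =====
def Spec_prioritized_select_list_py (where_cols : List String) (select_cols : List String) (limit : Int) (out : List String) : Prop := out = prioritized_select_list_py_alt where_cols select_cols limit
instance (where_cols : List String) (select_cols : List String) (limit : Int) (out : List String) : Decidable (Spec_prioritized_select_list_py where_cols select_cols limit out) := by unfold Spec_prioritized_select_list_py; infer_instance

-- ===== CLAIM (what is proved, stated in full; the proofs are below) =====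
def Claim_equal_prioritized_select_list_py : Prop := ∀ (where_cols : List String) (select_cols : List String) (limit : Int), Dom_prioritized_select_list_py where_cols select_cols limit → Spec_prioritized_select_list_py where_cols select_cols limit (prioritized_select_list_py where_cols select_cols limit)

-- ===== LEMMAS AND PROOFS =====

-- A's loop state stays "set = output list": with equal components the fold of pvStepA IS the fold of Set.add
lemma foldl_pvStepA_eq_add (l : List String) (t : PySem.Set String) :
    l.foldl pvStepA (t, t) = (l.foldl PySem.Set.add t, l.foldl PySem.Set.add t) := by
  induction l generalizing t with
  | nil => rfl
  | cons x xs ih =>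
    simp only [List.foldl_cons, pvStepA]
    by_cases h : x ∈ t
    · rw [if_pos h, PySem.Set.add_of_mem h]
      exact ih t
    · rw [if_neg h, PySem.Set.add_of_not_mem h]
      exact ih (t ++ [x])

-- a fold of Set.add appends only elements absent from the starting set
lemma foldl_add_decomp (l : List String) (t : PySem.Set String) :
    ∃ e, l.foldl PySem.Set.add t = t ++ e ∧ ∀ c ∈ e, c ∉ t := by
  induction l generalizing t with
  | nil => exact ⟨[], by simp⟩
  | cons x xs ih =>
    simp only [List.foldl_cons]
    by_cases h : x ∈ t
    · rw [PySem.Set.add_of_mem h]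
      exact ih t
    · rw [PySem.Set.add_of_not_mem h]
      obtain ⟨e, he, hmem⟩ := ih (t ++ [x])
      refine ⟨x :: e, by simpa using he, ?_⟩
      intro c hc
      cases hc with
      | head => exact h
      | tail _ hc =>
        intro hct
        exact hmem c hc (by simp [hct])

-- ===== VERDICT (by name: the statement is the Claim_ definition above) =====
theorem prioritized_select_list_py_spec : Claim_equal_prioritized_select_list_py := by
  intro w s limit _
  unfold Spec_prioritized_select_list_py prioritized_select_list_py prioritized_select_list_py_alt
  by_cases hstar : "*" ∈ s
  · simp [hstar]
  · simp only [hstar, if_false]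
    -- identify A's `ordered` with dedup (w ++ s) = ofList w ++ extras
    have hfold : ((w ++ s).foldl pvStepA (PySem.Set.empty, [])).2
        = (w ++ s).foldl PySem.Set.add [] := by
      have := foldl_pvStepA_eq_add (w ++ s) PySem.Set.empty
      simp only [PySem.Set.empty] at this ⊢
      rw [this]
    have hW : w.foldl PySem.Set.add [] = PySem.Set.ofList w := (PySem.Set.ofList_eq_foldl w).symm
    obtain ⟨E, hE, hEmem⟩ := foldl_add_decomp s (PySem.Set.ofList w)
    have hordered : ((w ++ s).foldl pvStepA (PySem.Set.empty, [])).2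
        = PySem.Set.ofList w ++ E := by
      rw [hfold, List.foldl_append, hW, hE]
    have hdedup : PySem.List.dedup (w ++ s) = PySem.Set.ofList w ++ E := by
      rw [PySem.List.dedup_eq_ofList, PySem.Set.ofList_eq_foldl, List.foldl_append, hW, hE]
    rw [hordered, hdedup]
    set W := PySem.Set.ofList w with hWdef
    -- the two branch conditions coincide; in the truncating branch the filters
    -- recover W and E, and the concatenation is a take of the whole list
    by_cases hcond : limit ≠ 0 ∧ limit < (((W ++ E).length : Nat) : Int)
    · rw [if_pos hcond, if_pos hcond]
      have hWfilter : W.filter (fun c => decide (c ∈ W)) = W :=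
        List.filter_eq_self.2 (by intro a ha; simpa using ha)
      have hWfilter' : W.filter (fun c => decide (c ∉ W)) = [] :=
        List.filter_eq_nil_iff.2 (by intro a ha; simpa using ha)
      have hEfilter : E.filter (fun c => decide (c ∈ W)) = [] :=
        List.filter_eq_nil_iff.2 (by intro a ha; simpa using hEmem a ha)
      have hEfilter' : E.filter (fun c => decide (c ∉ W)) = E :=
        List.filter_eq_self.2 (by intro a ha; simpa using hEmem a ha)
      have hmk : (W ++ E).filter (fun c => decide (c ∈ W)) = W := by
        rw [List.filter_append, hWfilter, hEfilter, List.append_nil]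
      have hrm : (W ++ E).filter (fun c => decide (c ∉ W)) = E := by
        rw [List.filter_append, hWfilter', hEfilter', List.nil_append]
      rw [hmk, hrm]
      rw [PySem.List.slice_to (W ++ E) (le_max_of_le_left (Int.natCast_nonneg _))]
      have hn : (max ((W.length : Nat) : Int) limit).toNat
          = W.length + (max 0 (limit - ((W.length : Nat) : Int))).toNat := by
        rcases le_total ((W.length : Nat) : Int) limit with h' | h'
        · rw [max_eq_right h', max_eq_right (by omega)]; omega
        · rw [max_eq_left h', max_eq_left (by omega)]; omega
      rw [hn, List.take_append, Nat.add_sub_cancel_left, List.take_of_length_le le_self_add]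
    · rw [if_neg hcond, if_neg hcond]
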